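-- pv_equiv track=rewrite | github.com/Aurorajingyi/Python-Data-Structures-Algorithms | 中缀表达式转后缀表达式（逆波兰式）.py | infix_to_postfix
-- ===== SOURCE A (Python) =====
-- def precedence(op):
--     if op in ('+', '-'):
--         return 1
--     if op in ('*', '/'):
--         return 2 # 优先级高
--     return 0 # 其他没有运算符的，返回0（最低）
--
-- def infix_to_postfix(expression):
--     output = []  # 输出的后缀表达式
--     stack = []   # 运算符栈，帮助处理运算符的优先级
--     number = ''  # 暂存数字字符串
--     i = 0        # 当前遍历的位置
--
--     while i < len(expression):
--         ch = expression[i] # ch是每次遍历的当前字符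
--         if ch.isdigit() or ch == '.': # 循环几次得到一个小数
--             # 数字或小数点，拼接成一个完整数字
--             number += ch
--             i += 1
--         elif ch == '-' and (i == 0 or expression[i-1] in '(-+*/'):
--             # 判断当前的 - 是否是负号，而不是减号运算符
--             # 处理负号的情况（负数识别）
--             number += ch
--             i += 1
--         else:
--             if number:
--                 # 遇到非数字字符时，前面的数字整体加入输出
--                 output.append(number)
--                 number = ''
--             if ch == '(':
--                 # 左括号直接入栈
--                 stack.append(ch)
--             elif ch == ')':
--                 # 右括号，弹出直到遇到左括号
--                 while stack and stack[-1] != '(':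
--                     output.append(stack.pop())
--                 stack.pop()  # 弹出'('
--             elif ch in '+-*/':
--                 # 运算符处理，弹出所有优先级更高或相同的运算符
--                 while stack and precedence(stack[-1]) >= precedence(ch):
--                     output.append(stack.pop())
--                 stack.append(ch)
--             i += 1
--
--     if number:
--         # 表达式结束时，如果还有未加入的数字
--         output.append(number)
--
--     # 把栈中剩余的运算符弹出
--     while stack:
--         output.append(stack.pop())
--
--     return output
-- ===== SOURCE B (Python) =====
-- def precedence(op):
--     if op in ('+', '-'):
--         return 1
--     if op in ('*', '/'):
--         return 2
--     return 0
--
-- def _tokenize(expression):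
--     # first pass: tagged tokens ('num', digits/dot/sign run) and ('op', single bracket/operator)
--     tokens = []
--     num = ''
--     prev = None
--     for ch in expression:
--         if ch.isdigit() or ch == '.' or (ch == '-' and (prev is None or prev in '(-+*/')):
--             num += ch
--         else:
--             if num:
--                 tokens.append(('num', num))
--                 num = ''
--             if ch in '()+-*/':
--                 tokens.append(('op', ch))
--         prev = ch
--     if num:
--         tokens.append(('num', num))
--     return tokens
--
-- def infix_to_postfix(expression):
--     # second pass: shunting-yard over the token list
--     output, stack = [], []
--     for kind, tok in _tokenize(expression):
--         if kind == 'num':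
--             output.append(tok)
--         elif tok == '(':
--             stack.append(tok)
--         elif tok == ')':
--             while stack and stack[-1] != '(':
--                 output.append(stack.pop())
--             stack.pop()
--         else:
--             while stack and precedence(stack[-1]) >= precedence(tok):
--                 output.append(stack.pop())
--             stack.append(tok)
--     while stack:
--         output.append(stack.pop())
--     return output
-- ===== Notes on version B (the rewrite author's own statement) =====
-- stated objective: alternative
-- what changed: Replaced A's single character-level loop that interleaves number assembly with operator handling by a two-pass design: a tokenizer that emits tagged ('num'/'op') tokens (tracking the raw previous character for the negative-sign test) followed by a shunting-yard loop over the token list.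
import Mathlib
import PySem

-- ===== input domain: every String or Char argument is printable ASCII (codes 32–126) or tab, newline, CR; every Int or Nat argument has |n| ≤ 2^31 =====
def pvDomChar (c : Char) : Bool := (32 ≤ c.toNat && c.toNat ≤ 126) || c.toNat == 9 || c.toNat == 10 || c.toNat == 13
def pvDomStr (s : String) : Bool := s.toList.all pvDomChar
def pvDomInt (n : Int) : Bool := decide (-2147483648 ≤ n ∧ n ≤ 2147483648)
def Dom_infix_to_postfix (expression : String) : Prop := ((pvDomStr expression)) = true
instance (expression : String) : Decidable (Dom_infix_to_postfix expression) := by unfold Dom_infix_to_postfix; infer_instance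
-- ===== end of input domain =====

-- B replaces A's single character loop by a tokenize-then-shunt two-pass decomposition (objective: alternative).

-- ===== PORT A =====
-- shared helper: Python's `precedence` (literally the same function in Source A and Source B)
def pvPrec (op : Char) : Int :=
  if op = '+' ∨ op = '-' then 1
  else if op = '*' ∨ op = '/' then 2
  else 0

-- shared helper: `while stack and precedence(stack[-1]) >= precedence(ch): output.append(stack.pop())`
-- (this while loop appears verbatim in both Source A and Source B; stack head = Python stack top)
def pvPopGE (stk : List Char) (out : List String) (ch : Char) : List Char × List String :=
  match stk with
  | [] => ([], out)
  | t :: rest =>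
      if pvPrec t ≥ pvPrec ch then pvPopGE rest (out ++ [String.ofList [t]]) ch
      else (t :: rest, out)

-- shared helper: `while stack and stack[-1] != '(': output.append(stack.pop())` then `stack.pop()`;
-- the final pop on an EMPTY stack is where Python raises IndexError — excluded by Pre_ below
def pvPopParen (stk : List Char) (out : List String) : List Char × List String :=
  match stk with
  | [] => ([], out)
  | t :: rest =>
      if t = '(' then (rest, out)
      else pvPopParen rest (out ++ [String.ofList [t]])

-- `i == 0 or expression[i-1] in '(-+*/'` with the raw previous character carried along
def pvIsSignCtx (prev : Option Char) : Bool :=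
  match prev with
  | none => true
  | some c => c == '(' || c == '-' || c == '+' || c == '*' || c == '/'

-- A's while loop, step for step (state: remaining chars, raw previous char, output, stack, number)
def pvALoop : List Char → Option Char → List String → List Char → List Char → List String
  | [], _, out, stk, num =>
      (if num ≠ [] then out ++ [String.ofList num] else out) ++ stk.map (fun c => String.ofList [c])
  | ch :: rest, prev, out, stk, num =>
      if ch.isDigit || ch == '.' then
        pvALoop rest (some ch) out stk (num ++ [ch])
      else if ch == '-' && pvIsSignCtx prev then
        pvALoop rest (some ch) out stk (num ++ [ch])
      else
        let out2 := if num ≠ [] then out ++ [String.ofList num] else out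
        if ch == '(' then pvALoop rest (some ch) out2 ('(' :: stk) []
        else if ch == ')' then
          let p := pvPopParen stk out2
          pvALoop rest (some ch) p.2 p.1 []
        else if ch == '+' || ch == '-' || ch == '*' || ch == '/' then
          let p := pvPopGE stk out2 ch
          pvALoop rest (some ch) p.2 (ch :: p.1) []
        else pvALoop rest (some ch) out2 stk []

def infix_to_postfix (expression : String) : List String :=
  pvALoop expression.toList none [] [] []

-- ===== PORT B =====
-- tagged token: ('num', s) or ('op', c) from Source B's _tokenize
inductive pvTok : Type
  | num : List Char → pvTok
  | op : Char → pvTok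
deriving DecidableEq, Repr

-- Source B's _tokenize: first pass, emits the token list in order
def pvTokenize : List Char → Option Char → List Char → List pvTok
  | [], _, num => if num ≠ [] then [pvTok.num num] else []
  | ch :: rest, prev, num =>
      if ch.isDigit || ch == '.' || (ch == '-' && pvIsSignCtx prev) then
        pvTokenize rest (some ch) (num ++ [ch])
      else
        (if num ≠ [] then [pvTok.num num] else []) ++
        (if ch == '(' || ch == ')' || ch == '+' || ch == '-' || ch == '*' || ch == '/'
         then [pvTok.op ch] else []) ++
        pvTokenize rest (some ch) []

-- Source B's second pass: shunting-yard over the token list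
def pvShunt : List pvTok → List String → List Char → List String
  | [], out, stk => out ++ stk.map (fun c => String.ofList [c])
  | pvTok.num s :: rest, out, stk => pvShunt rest (out ++ [String.ofList s]) stk
  | pvTok.op c :: rest, out, stk =>
      if c == '(' then pvShunt rest out ('(' :: stk)
      else if c == ')' then
        let p := pvPopParen stk out
        pvShunt rest p.2 p.1
      else
        let p := pvPopGE stk out c
        pvShunt rest p.2 (c :: p.1)

def infix_to_postfix_alt (expression : String) : List String :=
  pvShunt (pvTokenize expression.toList none []) [] []

-- ===== PRECONDITION & SPEC =====
-- Pre_ excludes exactly the strings in which some prefix contains more ')' than '(' :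
-- there Python A raises IndexError (stack.pop() on an empty stack), and B raises the same way.
def Pre_infix_to_postfix (expression : String) : Prop :=
  ∀ n ∈ List.range (expression.toList.length + 1),
    List.count ')' (List.take n expression.toList) ≤ List.count '(' (List.take n expression.toList)
instance (expression : String) : Decidable (Pre_infix_to_postfix expression) := by
  unfold Pre_infix_to_postfix; infer_instance

def pvWitness_infix_to_postfix : String := "1+2*(3-4)"

def Spec_infix_to_postfix (expression : String) (out : List String) : Prop := out = infix_to_postfix_alt expression
instance (expression : String) (out : List String) : Decidable (Spec_infix_to_postfix expression out) := by unfold Spec_infix_to_postfix; infer_instance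

-- ===== CLAIM (what is proved, stated in full; the proofs are below) =====
def Claim_equal_infix_to_postfix : Prop := ∀ (expression : String), Dom_infix_to_postfix expression → Pre_infix_to_postfix expression → Spec_infix_to_postfix expression (infix_to_postfix expression)

-- ===== LEMMAS AND PROOFS =====

-- running B's shunting loop past an optional leading number token flushes it to the output
lemma pvShunt_numFlush (num : List Char) (ts : List pvTok) (out : List String) (stk : List Char) :
    pvShunt ((if num ≠ [] then [pvTok.num num] else []) ++ ts) out stk
      = pvShunt ts (if num ≠ [] then out ++ [String.ofList num] else out) stk := by
  by_cases h : num = [] <;> simp [h, pvShunt]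

-- the invariant: A's one-pass state machine computes exactly B's shunting of the pending token stream
lemma pvALoop_eq_shunt (cs : List Char) :
    ∀ (prev : Option Char) (out : List String) (stk : List Char) (num : List Char),
      pvALoop cs prev out stk num = pvShunt (pvTokenize cs prev num) out stk := by
  induction cs with
  | nil =>
      intro prev out stk num
      by_cases h : num = [] <;> simp [pvALoop, pvTokenize, pvShunt, h]
  | cons ch rest ih =>
      intro prev out stk num
      by_cases hd : (ch.isDigit || ch == '.') = true
      · have hcond : (ch.isDigit || ch == '.' || (ch == '-' && pvIsSignCtx prev)) = true := by
          simp_all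
        simp [pvALoop, pvTokenize, hd, ih]
      · by_cases hs : (ch == '-' && pvIsSignCtx prev) = true
        · have hcond : (ch.isDigit || ch == '.' || (ch == '-' && pvIsSignCtx prev)) = true := by
            simp_all
          simp [pvALoop, pvTokenize, hd, hs, ih]
        · have hcond : (ch.isDigit || ch == '.' || (ch == '-' && pvIsSignCtx prev)) = false := by
            simp_all
          simp only [pvALoop, pvTokenize, hd, hs, Bool.or_self,
            Bool.false_eq_true, if_false, List.append_assoc]
          rw [pvShunt_numFlush]
          by_cases hop : (ch == '(' || ch == ')' || ch == '+' || ch == '-' || ch == '*' || ch == '/') = true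
          · simp only [hop, if_true]
            by_cases h1 : (ch == '(') = true
            · simp [pvShunt, h1, ih]
            · by_cases h2 : (ch == ')') = true
              · simp [pvShunt, h1, h2, ih]
              · have h3 : (ch == '+' || ch == '-' || ch == '*' || ch == '/') = true := by
                  simp_all
                simp [pvShunt, h1, h2, h3, ih]
          · have h3 : (ch == '+' || ch == '-' || ch == '*' || ch == '/') = false := by
              simp_all
            have hlp : ¬ ch = '(' := by simp_all
            have hrp : ¬ ch = ')' := by simp_all
            simp [hop, h3, hlp, hrp, ih]

-- ===== VERDICT (by name: the statement is the Claim_ definition above) =====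
theorem infix_to_postfix_spec : Claim_equal_infix_to_postfix := by
  intro expression _ _
  unfold Spec_infix_to_postfix infix_to_postfix infix_to_postfix_alt
  exact pvALoop_eq_shunt expression.toList none [] [] []
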